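-- pv_equiv track=rewrite | github.com/liziling98/NLP-labs | NER with the Structured Perceptron.py | phi_1
-- ===== SOURCE A (Python) =====
-- def add_(sentence):
--     '''
--     add _ between word and tag or tag and tag
--     '''
--     lis = []
--     for item in sentence:
--         lis.append(item[0] + '_' + item[1])
--     return lis
--
-- def phi_1(train,dictionary):
--     '''
--     return all word-tag and their count in the corpus
--     '''
--     dic = {}
--     for sen in train:
--         temp_lis = add_(sen)
--         # valid_word contains all word-tag pairs in corpus
--         valid_word = [k for k,v in dictionary.items()]
--         for item in temp_lis:
--             if item in valid_word:
--                 if item in dic.keys():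
--                     dic[item] += 1
--                 else:
--                     dic[item] = 1
--     return dic
-- ===== SOURCE B (Python) =====
-- def phi_1(train, dictionary):
--     # staged pipeline: flatten to a key stream, filter it by the dictionary's key set,
--     # dedup in first-occurrence order, then compute each distinct key's count with list.count
--     wanted = set(dictionary)
--     stream = [w + '_' + t for sen in train for w, t in sen]
--     stream = [k for k in stream if k in wanted]
--     order = list(dict.fromkeys(stream))
--     return {k: stream.count(k) for k in order}
-- ===== Notes on version B (the rewrite author's own statement) =====
-- stated objective: alternative
-- what changed: B keeps no counting dict at all while scanning: it builds the flattened key stream, filters it once against a set of the dictionary's keys (O(1) membership instead of A's linear scan of a key list rebuilt per sentence), dedups it with dict.fromkeys to fix the order, and obtains each distinct key's count with stream.count.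
import Mathlib
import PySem

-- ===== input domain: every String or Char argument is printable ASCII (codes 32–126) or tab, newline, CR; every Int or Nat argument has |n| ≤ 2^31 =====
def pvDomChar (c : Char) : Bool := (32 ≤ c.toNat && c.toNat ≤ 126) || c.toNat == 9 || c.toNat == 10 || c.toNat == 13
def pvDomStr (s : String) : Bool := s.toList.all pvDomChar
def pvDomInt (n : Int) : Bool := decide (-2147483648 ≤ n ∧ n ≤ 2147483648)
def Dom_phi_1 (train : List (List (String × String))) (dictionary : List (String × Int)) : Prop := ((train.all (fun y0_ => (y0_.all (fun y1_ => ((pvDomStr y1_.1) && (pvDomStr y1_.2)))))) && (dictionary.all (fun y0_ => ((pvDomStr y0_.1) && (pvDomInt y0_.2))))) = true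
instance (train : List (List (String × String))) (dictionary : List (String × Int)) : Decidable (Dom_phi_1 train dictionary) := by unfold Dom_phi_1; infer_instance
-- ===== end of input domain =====

-- B replaces A's interleaved scan-and-increment loop by a staged pipeline (flatten, filter by a
-- key set, dedup in first-occurrence order, count each distinct key) with no counting dict
-- maintained during the traversal (objective: alternative).


-- ===== PORT A =====
-- helper add_: lis = []; for item in sentence: lis.append(item[0] + '_' + item[1])
def add_ (sentence : List (String × String)) : List String :=
  sentence.foldl (fun lis item => lis ++ [item.1 ++ "_" ++ item.2]) []

def phi_1 (train : List (List (String × String))) (dictionary : List (String × Int)) : List (String × Int) :=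
  (train.foldl (fun dic sen =>
      let temp_lis := add_ sen
      let valid_word := dictionary.map (fun kv => kv.1)   -- [k for k,v in dictionary.items()]
      temp_lis.foldl (fun dic item =>
        if valid_word.contains item then
          if (dic.keys).contains item then
            dic.modify item 0 (· + 1)      -- dic[item] += 1 (key present)
          else
            dic.insert item 1              -- dic[item] = 1
        else dic) dic)
    PySem.Dict.empty).items

-- ===== PORT B =====
def phi_1_alt (train : List (List (String × String))) (dictionary : List (String × Int)) : List (String × Int) :=
  let wanted := PySem.Set.ofList (dictionary.map (fun kv => kv.1))   -- set(dictionary): the keys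
  let stream0 := train.flatMap (fun sen => sen.map (fun p => p.1 ++ "_" ++ p.2))
  let stream := stream0.filter (fun k => PySem.Set.contains wanted k)   -- [k for k in stream if k in wanted]
  let order := PySem.Set.ofList stream                                  -- list(dict.fromkeys(stream))
  -- {k: stream.count(k) for k in order}
  (order.foldl (fun d k => d.insert k ((stream.count k : Int))) PySem.Dict.empty).items

-- ===== PRECONDITION & SPEC =====
def Spec_phi_1 (train : List (List (String × String))) (dictionary : List (String × Int)) (out : List (String × Int)) : Prop := out = phi_1_alt train dictionary
instance (train : List (List (String × String))) (dictionary : List (String × Int)) (out : List (String × Int)) : Decidable (Spec_phi_1 train dictionary out) := by unfold Spec_phi_1; infer_instance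

-- ===== CLAIM =====
def Claim_equal_phi_1 : Prop := ∀ (train : List (List (String × String))) (dictionary : List (String × Int)), Dom_phi_1 train dictionary → Spec_phi_1 train dictionary (phi_1 train dictionary)

-- ===== LEMMAS AND PROOFS =====

-- add_ builds sentence.map keyOf
theorem add__eq_map (sentence : List (String × String)) :
    add_ sentence = sentence.map (fun p => p.1 ++ "_" ++ p.2) := by
  unfold add_
  suffices h : ∀ (l : List (String × String)) (acc : List String),
      l.foldl (fun lis item => lis ++ [item.1 ++ "_" ++ item.2]) acc
        = acc ++ l.map (fun p => p.1 ++ "_" ++ p.2) by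
    simpa using h sentence []
  intro l
  induction l with
  | nil => simp
  | cons x xs ih => intro acc; simp [List.foldl_cons, ih]

-- a guarded fold equals the fold over the filtered list
theorem foldl_if_filter {α β : Type} (c : α → Bool) (f : β → α → β) (l : List α) (d : β) :
    l.foldl (fun d x => if c x then f d x else d) d = (l.filter c).foldl f d := by
  induction l generalizing d with
  | nil => rfl
  | cons x xs ih =>
    by_cases h : c x = true
    · simp [List.foldl_cons, List.filter_cons, h, ih]
    · simp only [Bool.not_eq_true] at h
      simp [List.foldl_cons, List.filter_cons, h, ih]

-- a nested fold over sentences equals the fold over the flattened key stream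
theorem foldl_flatten_keys (f : PySem.Dict String Int → String → PySem.Dict String Int)
    (train : List (List (String × String))) (d : PySem.Dict String Int) :
    train.foldl (fun d sen => (sen.map (fun p => p.1 ++ "_" ++ p.2)).foldl f d) d
      = (train.flatMap (fun sen => sen.map (fun p => p.1 ++ "_" ++ p.2))).foldl f d := by
  induction train generalizing d with
  | nil => rfl
  | cons x xs ih => simp [List.foldl_cons, List.flatMap_cons, List.foldl_append, ih]

-- A's counting step is exactly Counter's modify step
theorem stepA_eq_modify (d : PySem.Dict String Int) (x : String) :
    (if (d.keys).contains x then d.modify x 0 (· + 1) else d.insert x 1)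
      = d.modify x 0 (· + 1) := by
  by_cases h : (d.keys).contains x = true
  · have hmem : x ∈ d.keys := by simpa using h
    simp [hmem]
  · simp only [Bool.not_eq_true] at h
    have hc : d.contains x = false := by
      rw [PySem.Dict.contains_eq_decide_mem_keys]
      simpa using h
    simp only [h, PySem.Dict.modify,
      PySem.Dict.getD_of_not_contains d 0 hc]
    norm_num

-- the two membership tests agree pointwise
theorem contains_set_eq_contains_list (dictionary : List (String × Int)) (k : String) :
    PySem.Set.contains (PySem.Set.ofList (dictionary.map (fun kv => kv.1))) k
      = (dictionary.map (fun kv => kv.1)).contains k := by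
  have hm : (k ∈ PySem.Set.ofList (dictionary.map (fun kv => kv.1)))
      ↔ k ∈ dictionary.map (fun kv => kv.1) :=
    PySem.Set.mem_ofList (dictionary.map (fun kv => kv.1)) k
  simp [PySem.Set.contains_eq_listContains, List.contains_eq_mem, hm]

-- A computes the items of the Counter of the flattened, pre-filtered key stream
theorem phi_1_eq_counter (train : List (List (String × String))) (dictionary : List (String × Int)) :
    phi_1 train dictionary
      = (PySem.Dict.counter ((train.flatMap (fun sen => sen.map (fun p => p.1 ++ "_" ++ p.2))).filter
          (fun k => (dictionary.map (fun kv => kv.1)).contains k))).items := by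
  unfold phi_1
  simp only [add__eq_map]
  rw [foldl_flatten_keys (fun dic item =>
        if (dictionary.map (fun kv => kv.1)).contains item then
          (if (dic.keys).contains item then dic.modify item 0 (· + 1) else dic.insert item 1)
        else dic)]
  rw [foldl_if_filter]
  congr 1
  have : (fun (d : PySem.Dict String Int) (x : String) =>
      if (d.keys).contains x then d.modify x 0 (· + 1) else d.insert x 1)
      = fun d x => d.modify x 0 (· + 1) := by
    funext d x; exact stepA_eq_modify d x
  rw [PySem.Dict.counter_eq_foldl, this]

-- B's final dict comprehension: a fold inserting distinct fresh keys appends its pairs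
theorem phi_1_alt_eq_map (train : List (List (String × String))) (dictionary : List (String × Int)) :
    phi_1_alt train dictionary
      = (PySem.Set.ofList
          ((train.flatMap (fun sen => sen.map (fun p => p.1 ++ "_" ++ p.2))).filter
            (fun k => (dictionary.map (fun kv => kv.1)).contains k))).map
          (fun k => (k, (((train.flatMap (fun sen => sen.map (fun p => p.1 ++ "_" ++ p.2))).filter
            (fun k => (dictionary.map (fun kv => kv.1)).contains k)).count k : Int))) := by
  unfold phi_1_alt
  simp only [contains_set_eq_contains_list]
  set stream := (train.flatMap (fun sen => sen.map (fun p => p.1 ++ "_" ++ p.2))).filter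
      (fun k => (dictionary.map (fun kv => kv.1)).contains k) with hstream
  have hfresh : ∀ a ∈ PySem.Set.ofList stream,
      (PySem.Dict.empty : PySem.Dict String Int).contains a = false := by
    intro a _; simp
  have hnodup : ((PySem.Set.ofList stream).map (fun k => k)).Nodup := by
    simpa using PySem.Set.nodup_ofList (xs := stream)
  have := PySem.Dict.items_foldl_insert_fresh
      (d := (PySem.Dict.empty : PySem.Dict String Int))
      (l := PySem.Set.ofList stream) (k := fun k => k)
      (v := fun k => (stream.count k : Int)) hfresh hnodup
  simpa using this

-- ===== VERDICT =====
theorem phi_1_spec : Claim_equal_phi_1 := by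
  intro train dictionary _
  unfold Spec_phi_1
  rw [phi_1_eq_counter, phi_1_alt_eq_map, PySem.Dict.items_counter]
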